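-- pv_equiv track=rewrite | github.com/SaiSudhaV/coding_platforms | palindrome_sum.py | palindrome_sum
-- ===== SOURCE A (Python) =====
-- def get_reverse(num):
--     rev=0
--
--     while num!=0:
--        r=num%10
--        rev=(rev*10)+r
--        num=num//10
--     return rev
--
-- def isPalindrome(num):
--
--     if num==get_reverse(num):
--         return True
--     else:
--         return False
--
-- def palindrome_sum(first,last):
--     sum1=0
--     if first<0 or last<0:
--         return -1
--     elif first>last:
--         return -2
--     else:
--         for i in range(first,last):
--             if(isPalindrome(i)):
--                 sum1=sum1+i
--         return sum1
-- ===== SOURCE B (Python) =====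
-- def _digits(n):
--     ds = []
--     while n > 0:
--         ds.append(n % 10)
--         n //= 10
--     return ds
--
-- def palindrome_sum(first, last):
--     if first < 0 or last < 0:
--         return -1
--     if first > last:
--         return -2
--     return sum(i for i in range(first, last) if _digits(i) == _digits(i)[::-1])
-- ===== Notes on version B (the rewrite author's own statement) =====
-- stated objective: alternative
-- what changed: Replaces A's numeric reverse-and-compare inner while loop and explicit running-sum accumulator with a filter-and-sum over each number's little-endian digit list compared to its own reversal.
import Mathlib
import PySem

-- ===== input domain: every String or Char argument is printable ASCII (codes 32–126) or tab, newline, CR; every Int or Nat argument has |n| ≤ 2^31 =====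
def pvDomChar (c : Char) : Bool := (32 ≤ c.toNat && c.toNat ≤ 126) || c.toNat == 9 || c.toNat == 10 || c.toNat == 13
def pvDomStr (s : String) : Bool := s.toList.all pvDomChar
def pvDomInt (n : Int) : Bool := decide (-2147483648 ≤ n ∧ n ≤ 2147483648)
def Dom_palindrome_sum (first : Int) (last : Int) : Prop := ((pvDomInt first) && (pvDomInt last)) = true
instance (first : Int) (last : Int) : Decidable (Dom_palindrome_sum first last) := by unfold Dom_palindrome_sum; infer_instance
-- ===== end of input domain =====

-- B replaces A's numeric reverse-and-compare inner loop and running-sum accumulator with a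
-- filter-and-sum over each number's digit list compared with its own reversal (objective: alternative).

-- ===== PORT A =====
-- get_reverse's while loop, run on fuel num.toNat (enough: each step divides num by 10);
-- exact for num >= 0 (A only calls it with i >= 0: Python's loop does not terminate for negative num).
def getReverseAux : Nat → Int → Int → Int
  | 0, _, rev => rev
  | fuel+1, num, rev =>
    if 0 < num then getReverseAux fuel (PySem.Int.floordiv num 10) (rev * 10 + PySem.Int.mod num 10)
    else rev

def getReverse (num : Int) (rev : Int) : Int := getReverseAux num.toNat num rev

def isPalindromeA (num : Int) : Bool :=
  if num = getReverse num 0 then true else false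

def palindrome_sum (first : Int) (last : Int) : Int :=
  if first < 0 || last < 0 then -1
  else if first > last then -2
  else (PySem.List.pyRange first last 1).foldl
        (fun sum1 i => if isPalindromeA i then sum1 + i else sum1) 0

-- ===== PORT B =====
-- _digits's while loop on the same fuel scheme: builds the little-endian digit list
-- (append order = cons order here).
def digitsBAux : Nat → Int → List Int
  | 0, _ => []
  | fuel+1, n =>
    if 0 < n then PySem.Int.mod n 10 :: digitsBAux fuel (PySem.Int.floordiv n 10)
    else []

def digitsB (n : Int) : List Int := digitsBAux n.toNat n

def palindrome_sum_alt (first : Int) (last : Int) : Int :=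
  if first < 0 || last < 0 then -1
  else if first > last then -2
  else ((PySem.List.pyRange first last 1).filter
          (fun i => digitsB i == (digitsB i).reverse)).sum

-- ===== PRECONDITION & SPEC =====
def Spec_palindrome_sum (first : Int) (last : Int) (out : Int) : Prop := out = palindrome_sum_alt first last
instance (first : Int) (last : Int) (out : Int) : Decidable (Spec_palindrome_sum first last out) := by unfold Spec_palindrome_sum; infer_instance

-- ===== CLAIM (what is proved, stated in full; the proofs are below) =====
def Claim_equal_palindrome_sum : Prop := ∀ (first : Int) (last : Int), Dom_palindrome_sum first last → Spec_palindrome_sum first last (palindrome_sum first last)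

-- ===== LEMMAS AND PROOFS =====

-- digitsBAux on a natural number computes (the cast of) Nat.digits 10, given enough fuel.
lemma digitsBAux_natCast : ∀ (f : Nat) (n : Nat), n ≤ f →
    digitsBAux f (n : Int) = (Nat.digits 10 n).map (Int.ofNat)
  | 0, n, hf => by
    have : n = 0 := by omega
    subst this
    simp [digitsBAux]
  | f+1, n, hf => by
    by_cases h : 0 < n
    · have hlt : (0 : Int) < (n : Int) := by exact_mod_cast h
      have hdiv : PySem.Int.floordiv (n : Int) 10 = ((n / 10 : Nat) : Int) := by
        exact_mod_cast PySem.Int.floordiv_natCast n 10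
      have hmod : PySem.Int.mod (n : Int) 10 = ((n % 10 : Nat) : Int) := by
        exact_mod_cast PySem.Int.mod_natCast n 10
      have hd : n / 10 < n := Nat.div_lt_self h (by norm_num)
      rw [digitsBAux, if_pos hlt, hdiv, hmod, digitsBAux_natCast f (n / 10) (by omega),
        Nat.digits_def' (by norm_num : (1:Nat) < 10) h]
      simp
    · have : n = 0 := by omega
      subst this
      simp [digitsBAux]

lemma digitsB_natCast (n : Nat) : digitsB (n : Int) = (Nat.digits 10 n).map (Int.ofNat) := by
  have : ((n : Int)).toNat = n := rfl
  rw [digitsB, this, digitsBAux_natCast n n (le_refl n)]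

-- getReverseAux accumulates: rev shifted by the digit count plus the reversed-digit value.
lemma getReverseAux_natCast : ∀ (f : Nat) (n : Nat) (rev : Int), n ≤ f →
    getReverseAux f (n : Int) rev =
      rev * 10 ^ (Nat.digits 10 n).length + (Nat.ofDigits 10 (Nat.digits 10 n).reverse : Nat)
  | 0, n, rev, hf => by
    have : n = 0 := by omega
    subst this
    simp [getReverseAux]
  | f+1, n, rev, hf => by
    by_cases h : 0 < n
    · have hlt : (0 : Int) < (n : Int) := by exact_mod_cast h
      have hdiv : PySem.Int.floordiv (n : Int) 10 = ((n / 10 : Nat) : Int) := by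
        exact_mod_cast PySem.Int.floordiv_natCast n 10
      have hmod : PySem.Int.mod (n : Int) 10 = ((n % 10 : Nat) : Int) := by
        exact_mod_cast PySem.Int.mod_natCast n 10
      have hd : n / 10 < n := Nat.div_lt_self h (by norm_num)
      rw [getReverseAux, if_pos hlt, hdiv, hmod,
        getReverseAux_natCast f (n / 10) (rev * 10 + ((n % 10 : Nat) : Int)) (by omega),
        Nat.digits_def' (by norm_num : (1:Nat) < 10) h]
      simp only [List.reverse_cons, List.length_cons]
      rw [Nat.ofDigits_append]
      push_cast
      simp [Nat.ofDigits]
      ring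
    · have : n = 0 := by omega
      subst this
      simp [getReverseAux]

lemma getReverse_natCast (n : Nat) (rev : Int) :
    getReverse (n : Int) rev =
      rev * 10 ^ (Nat.digits 10 n).length + (Nat.ofDigits 10 (Nat.digits 10 n).reverse : Nat) := by
  have : ((n : Int)).toNat = n := rfl
  rw [getReverse, this, getReverseAux_natCast n n rev (le_refl n)]

-- A natural number equals the value of its reversed digit list iff the digit list is a palindrome.
lemma nat_pal_iff (n : Nat) :
    n = Nat.ofDigits 10 (Nat.digits 10 n).reverse ↔
      Nat.digits 10 n = (Nat.digits 10 n).reverse := by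
  constructor
  · intro h
    by_cases hn : n = 0
    · subst hn; simp
    -- first digit is nonzero, else n would be too small
    obtain ⟨d, t, hds⟩ : ∃ d t, Nat.digits 10 n = d :: t := by
      rcases hl : Nat.digits 10 n with _ | ⟨d, t⟩
      · exact absurd (Nat.digits_ne_nil_iff_ne_zero.mpr hn hl) (fun h => h)
      · exact ⟨d, t, rfl⟩
    have hlt : ∀ x ∈ Nat.digits 10 n, x < 10 :=
      fun x hx => Nat.digits_lt_base (by norm_num) hx
    have hdne : d ≠ 0 := by
      intro hd0
      subst hd0
      have hb : n < 10 ^ t.length := by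
        rw [h, hds, List.reverse_cons, Nat.ofDigits_append]
        simp [Nat.ofDigits]
        have := Nat.ofDigits_lt_base_pow_length (b := 10) (l := t.reverse) (by norm_num)
          (fun x hx => hlt x (by rw [hds]; exact List.mem_cons_of_mem _ (List.mem_reverse.mp hx)))
        simpa using this
      have hg : 10 ^ (Nat.digits 10 n).length ≤ 10 * n :=
        Nat.base_pow_length_digits_le 10 n (by norm_num) hn
      rw [hds] at hg
      simp [pow_succ] at hg
      omega
    have hlast : (Nat.digits 10 n).reverse.getLast (by simp [hds]) ≠ 0 := by
      rw [List.getLast_reverse]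
      simpa [hds] using hdne
    have := Nat.digits_ofDigits 10 (by norm_num) (Nat.digits 10 n).reverse
      (fun x hx => hlt x (List.mem_reverse.mp hx)) (fun _ => hlast)
    rw [← h] at this
    conv_lhs => rw [this]
  · intro h
    conv_lhs => rw [← Nat.ofDigits_digits 10 n]
    rw [← h]

-- Bridge: for i ≥ 0 the two palindrome tests agree.
lemma pal_tests_agree (i : Int) (hi : 0 ≤ i) :
    isPalindromeA i = (digitsB i == (digitsB i).reverse) := by
  obtain ⟨n, rfl⟩ : ∃ n : Nat, i = (n : Int) := ⟨i.toNat, (Int.toNat_of_nonneg hi).symm⟩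
  rw [isPalindromeA, getReverse_natCast, digitsB_natCast, ← List.map_reverse]
  have hmapinj : ∀ {l l' : List Nat}, l.map Int.ofNat = l'.map Int.ofNat → l = l' :=
    fun h => List.map_injective_iff.mpr (fun a b hab => Int.ofNat.inj hab) h
  by_cases h : Nat.digits 10 n = (Nat.digits 10 n).reverse
  · rw [if_pos, ← h, beq_self_eq_true]
    have hn := (nat_pal_iff n).mpr h
    simp only [zero_mul, zero_add]
    exact_mod_cast hn
  · rw [if_neg]
    · symm
      rw [beq_eq_false_iff_ne]
      intro hc
      exact h (hmapinj hc)
    · intro hc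
      apply h
      apply (nat_pal_iff n).mp
      simp only [zero_mul, zero_add] at hc
      exact_mod_cast hc

-- The accumulator loop with a test equals the sum of the filtered list.
lemma foldl_if_eq_sum_filter (p : Int → Bool) :
    ∀ (l : List Int) (a : Int),
      l.foldl (fun s i => if p i then s + i else s) a = a + (l.filter p).sum
  | [], a => by simp
  | i :: t, a => by
    by_cases h : p i
    · simp [List.foldl_cons, h, foldl_if_eq_sum_filter p t]
      ring
    · simp [List.foldl_cons, h, foldl_if_eq_sum_filter p t]

-- ===== VERDICT (by name: the statement is the Claim_ definition above) =====
theorem palindrome_sum_spec : Claim_equal_palindrome_sum := by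
  intro first last _
  unfold Spec_palindrome_sum palindrome_sum palindrome_sum_alt
  by_cases h1 : first < 0 || last < 0
  · simp [h1]
  · rw [if_neg h1, if_neg h1]
    by_cases h2 : first > last
    · simp [h2]
    · rw [if_neg h2, if_neg h2]
      have hfirst : 0 ≤ first := by
        simp only [Bool.or_eq_true, decide_eq_true_eq] at h1
        omega
      rw [foldl_if_eq_sum_filter _ _ 0, zero_add]
      congr 1
      apply List.filter_congr
      intro i hi
      have : 0 ≤ i := by
        have := (PySem.List.mem_pyRange_one.mp hi).1
        omega
      rw [pal_tests_agree i this]
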